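-- pv_equiv track=rewrite | github.com/algorithm-studying/daily | 2022_01_11/1_python_조수빈.py | solution
-- ===== SOURCE A (Python) =====
-- def solution(new_id):
--     answer = ''
--
--     # 1단계
--     new_id = new_id.lower()
--
--     # 2단계
--     for i in new_id:
--         if i.islower() or i.isdigit() or i in ['-', '_', '.']:
--            answer += i
--
--     # 3단계
--     while '..' in answer:
--         answer = answer.replace('..', '.')
--
--     # 4단계
--     answer = answer[1:] if answer[0] == '.' and len(answer) > 1 else answer
--     answer = answer[:-1] if answer[-1] == '.' else answer
--
--
--     '''if answer :
--           if answer[0] == '.':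
--                   answer = answer[1:]
--           elif answer[-1] == '.':
--                   answer = answer[:-1]
--     '''
--
--     # 5단계
--     if answer == '' :
--         answer = 'a'
--
--     # 6단계
--     if len(answer) >= 16:
--         answer = answer[0:15]
--         if answer[-1] == '.':
--             answer = answer[0:-1]
--
--     # 7단계
--     while len(answer) <= 2:
--         answer = answer + answer[-1]
--     return answer
-- ===== SOURCE B (Python) =====
-- def solution(new_id):
--     # One streaming pass fuses lowercasing, filtering and double-dot collapsing;
--     # then strip the edge dots, apply the default, truncate, pad in closed form.
--     buf = []
--     for ch in new_id:
--         c = ch.lower()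
--         if c.islower() or c.isdigit() or c in '-_.':
--             if c == '.' and buf and buf[-1] == '.':
--                 continue
--             buf.append(c)
--     s = ''.join(buf).strip('.')
--     if not s:
--         s = 'a'
--     t = s[:15]
--     if t.endswith('.'):
--         t = t[:-1]
--     if len(t) < 3:
--         t = t + t[-1] * (3 - len(t))
--     return t
-- ===== Notes on version B (the rewrite author's own statement) =====
-- stated objective: simpler
-- what changed: B fuses A's separate filter loop and A's iterated dot-collapsing replace loop into one streaming pass that skips a dot following a kept dot, replaces the two single-edge-dot trims with one strip call, and replaces the padding while-loop with a closed-form repeat of the last character.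
import Mathlib
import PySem

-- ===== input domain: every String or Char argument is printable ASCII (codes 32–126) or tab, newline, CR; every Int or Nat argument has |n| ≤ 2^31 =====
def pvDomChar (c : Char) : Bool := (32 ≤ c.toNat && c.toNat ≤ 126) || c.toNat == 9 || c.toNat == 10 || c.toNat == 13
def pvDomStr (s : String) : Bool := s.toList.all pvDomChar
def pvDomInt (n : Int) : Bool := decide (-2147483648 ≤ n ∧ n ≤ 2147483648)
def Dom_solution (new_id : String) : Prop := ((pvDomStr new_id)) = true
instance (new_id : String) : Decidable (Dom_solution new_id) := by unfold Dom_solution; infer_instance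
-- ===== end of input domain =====

-- B fuses A's filter pass and A's iterated dot-collapsing replace loop into one
-- streaming pass and replaces the padding loop by a closed form (objective: simpler).

-- ===== PORT A =====
-- the character test of step 2 (same test in both Pythons)
def pvAllowed (c : Char) : Bool :=
  PySem.Chars.islower c || PySem.Chars.isdigit c || decide (c ∈ ['-', '_', '.'])

-- helper characterisation of one dot-collapsing replace pass, needed only to prove
-- termination of the ported while-loop (the port itself calls PySem.Chars.replace)
def pvRep : List Char → List Char
  | [] => []
  | [c] => [c]
  | c :: d :: t => if c = '.' ∧ d = '.' then '.' :: pvRep t else c :: pvRep (d :: t)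

theorem pvRep_go (fuel : Nat) : ∀ (l acc : List Char), l.length ≤ fuel →
    PySem.Chars.replace.go ['.', '.'] ['.'] fuel l acc = acc.reverse ++ pvRep l := by
  induction fuel with
  | zero =>
    intro l acc h
    have hl : l = [] := List.eq_nil_of_length_eq_zero (by omega)
    subst hl; simp [PySem.Chars.replace.go, pvRep]
  | succ n ih =>
    intro l acc h
    match l with
    | [] => simp [PySem.Chars.replace.go, pvRep]
    | [c] =>
      have hp : (['.', '.'].isPrefixOf [c]) = false := by
        rw [Bool.eq_false_iff]
        intro hpf
        have := (List.isPrefixOf_iff_prefix.mp hpf).length_le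
        simp at this
      simp only [PySem.Chars.replace.go, hp, Bool.false_eq_true, if_false]
      rw [ih [] (c :: acc) (by simp)]
      simp [pvRep]
    | c :: d :: t =>
      by_cases hcd : c = '.' ∧ d = '.'
      · obtain ⟨rfl, rfl⟩ := hcd
        have hp : (['.', '.'].isPrefixOf ('.' :: '.' :: t)) = true := by
          rw [List.isPrefixOf_iff_prefix]
          simp [List.cons_prefix_cons]
        simp only [PySem.Chars.replace.go, hp, if_true, List.length_cons, List.drop_succ_cons, List.drop_zero, List.length_nil, List.reverse_cons, List.reverse_nil, List.nil_append,
          List.singleton_append]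
        rw [ih t ('.' :: acc) (by simp at h ⊢; omega)]
        simp [pvRep]
      · have hp : (['.', '.'].isPrefixOf (c :: d :: t)) = false := by
          rw [Bool.eq_false_iff]
          intro hpf
          have := List.isPrefixOf_iff_prefix.mp hpf
          rw [List.cons_prefix_cons] at this
          rw [List.cons_prefix_cons] at this
          exact hcd ⟨this.1.symm, this.2.1.symm⟩
        simp only [PySem.Chars.replace.go, hp, Bool.false_eq_true, if_false]
        rw [ih (d :: t) (c :: acc) (by simp at h ⊢; omega)]
        simp [pvRep, hcd]

theorem pvReplace_dots (s : List Char) :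
    PySem.Chars.replace s ['.', '.'] ['.'] = pvRep s := by
  unfold PySem.Chars.replace
  simp only [List.isEmpty]
  · exact (pvRep_go s.length s [] le_rfl).trans (by simp)

theorem pvRep_length_le (s : List Char) : (pvRep s).length ≤ s.length := by
  induction s using pvRep.induct with
  | case1 => simp [pvRep]
  | case2 c => simp [pvRep]
  | case3 c d t h ih => simp [pvRep, h]; omega
  | case4 c d t h ih => simp [pvRep, h] at ih ⊢; omega

theorem pvRep_length_lt (s : List Char) (h : ['.', '.'] <:+: s) :
    (pvRep s).length < s.length := by
  induction s using pvRep.induct with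
  | case1 => exact absurd h.length_le (by simp)
  | case2 c => exact absurd h.length_le (by simp)
  | case3 c d t hcd ih =>
    obtain ⟨rfl, rfl⟩ := hcd
    have := pvRep_length_le t
    simp [pvRep]; omega
  | case4 c d t hcd ih =>
    rcases List.infix_cons_iff.mp h with hpre | hinf
    · rw [List.cons_prefix_cons] at hpre
      rw [List.cons_prefix_cons] at hpre
      exact absurd ⟨hpre.1.symm, hpre.2.1.symm⟩ hcd
    · have := ih hinf
      simp [pvRep, hcd] at this ⊢; omega

-- port of step 3, the iterated dot-collapsing replace loop of A
def pvCollapse (s : List Char) : List Char :=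
  if PySem.Chars.isIn ['.', '.'] s = true then
    pvCollapse (PySem.Chars.replace s ['.', '.'] ['.'])
  else s
termination_by s.length
decreasing_by
  rw [pvReplace_dots]
  exact pvRep_length_lt s ((PySem.Chars.isIn_iff_infix _ _).mp (by assumption))

-- port of:  while len(answer) <= 2: answer = answer + answer[-1]
-- (answer is never empty here in Python; the pyGetD default is never read)
def pvPad (s : List Char) : List Char :=
  if s.length ≤ 2 then pvPad (s ++ [PySem.List.pyGetD s (-1) ' ']) else s
termination_by 3 - s.length
decreasing_by simp; omega

def solution (new_id : String) : String :=
  let s := PySem.Chars.lower new_id.toList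
  let a2 := s.foldl (fun acc c => if pvAllowed c then acc ++ [c] else acc) []
  let a3 := pvCollapse a2
  -- step 4: Pre_solution excludes a3 = [] (Python raises IndexError at answer[0]);
  -- inside Pre_ the pyGetD defaults are never read
  let a4 := if PySem.List.pyGetD a3 0 ' ' = '.' ∧ 1 < a3.length then
      PySem.List.slice a3 (some 1) none else a3
  let a5 := if PySem.List.pyGetD a4 (-1) ' ' = '.' then
      PySem.List.slice a4 none (some (-1)) else a4
  let a6 := if a5 = [] then ['a'] else a5
  let a7 := if 16 ≤ a6.length then
      let t := PySem.List.slice a6 (some 0) (some 15)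
      if PySem.List.pyGetD t (-1) ' ' = '.' then PySem.List.slice t none (some (-1)) else t
    else a6
  String.mk (pvPad a7)

-- ===== PORT B =====
def solution_alt (new_id : String) : String :=
  let buf := new_id.toList.foldl (fun buf ch =>
      let c := PySem.Chars.lowerChar ch
      if pvAllowed c then
        if c = '.' ∧ buf ≠ [] ∧ PySem.List.pyGetD buf (-1) ' ' = '.' then buf
        else buf ++ [c]
      else buf) []
  let s0 := PySem.Chars.stripChars buf ['.']
  let s := if s0 = [] then ['a'] else s0
  let t0 := PySem.List.slice s none (some 15)
  let t := if PySem.Chars.endswith t0 ['.'] then PySem.List.slice t0 none (some (-1)) else t0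
  String.mk (if t.length < 3 then
      t ++ List.replicate (3 - t.length) (PySem.List.pyGetD t (-1) ' ')
    else t)

-- ===== PRECONDITION & SPEC =====
-- Pre_ excludes exactly the inputs with no letter, digit, hyphen, underscore or dot:
-- there A's filtered string is empty and answer[0] raises IndexError.
def Pre_solution (new_id : String) : Prop :=
  new_id.toList.any (fun c => pvAllowed (PySem.Chars.lowerChar c)) = true
instance (new_id : String) : Decidable (Pre_solution new_id) := by
  unfold Pre_solution; infer_instance
def pvWitness_solution : String := "..Compu!ter"

def Spec_solution (new_id : String) (out : String) : Prop := out = solution_alt new_id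
instance (new_id : String) (out : String) : Decidable (Spec_solution new_id out) := by
  unfold Spec_solution; infer_instance

-- ===== CLAIM (what is proved, stated in full; the proofs are below) =====
def Claim_equal_solution : Prop := ∀ (new_id : String), Dom_solution new_id → Pre_solution new_id → Spec_solution new_id (solution new_id)
-- ===== LEMMAS AND PROOFS =====

-- canonical '..'-collapsed form: pvDD p s keeps s's characters but drops every
-- dot that immediately follows a kept dot; p says the previously kept char is a dot
def pvDD (p : Bool) : List Char → List Char
  | [] => []
  | c :: t => if c = '.' then (if p then pvDD true t else '.' :: pvDD true t)
              else c :: pvDD false t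

theorem pvDD_rep (s : List Char) : ∀ p, pvDD p (pvRep s) = pvDD p s := by
  induction s using pvRep.induct with
  | case1 => intro p; rfl
  | case2 c => intro p; rfl
  | case3 c d t h ih =>
    obtain ⟨rfl, rfl⟩ := h
    intro p
    cases p <;> simp [pvRep, pvDD, ih]
  | case4 c d t h ih =>
    intro p
    by_cases hc : c = '.'
    · subst hc
      have hd : ¬ d = '.' := fun hd => h ⟨rfl, hd⟩
      cases p <;> simp [pvRep, pvDD, hd, ih]
    · simp [pvRep, pvDD, hc, ih]

theorem pvDD_head (s : List Char) : (pvDD true s).head? ≠ some '.' := by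
  induction s with
  | nil => simp [pvDD]
  | cons c t ih =>
    by_cases hc : c = '.'
    · subst hc; simpa [pvDD] using ih
    · simp [pvDD, hc]

theorem pvDD_no_dots (s : List Char) (h : ¬ ['.', '.'] <:+: s) :
    pvDD false s = s ∧ (s.head? ≠ some '.' → pvDD true s = s) := by
  induction s with
  | nil => simp [pvDD]
  | cons c t ih =>
    have ht : ¬ ['.', '.'] <:+: t := fun h' => h (h'.trans (List.suffix_cons c t).isInfix)
    obtain ⟨ih1, ih2⟩ := ih ht
    by_cases hc : c = '.'
    · subst hc
      have hth : t.head? ≠ some '.' := by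
        intro hh
        cases t with
        | nil => simp at hh
        | cons d t' =>
          simp at hh
          subst hh
          exact h ⟨[], t', by simp⟩
      constructor
      · simp [pvDD, ih2 hth]
      · intro hh; simp at hh
    · refine ⟨by simp [pvDD, hc, ih1], fun _ => by simp [pvDD, hc, ih1]⟩

theorem pvCollapse_eq_dd_aux (n : Nat) : ∀ (s : List Char), s.length ≤ n →
    pvCollapse s = pvDD false s := by
  induction n with
  | zero =>
    intro s h
    have hl : s = [] := List.eq_nil_of_length_eq_zero (by omega)
    subst hl
    rw [pvCollapse]
    simp [show PySem.Chars.isIn ['.', '.'] ([] : List Char) = false from by decide, pvDD]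
  | succ n ih =>
    intro s h
    rw [pvCollapse]
    by_cases hin : PySem.Chars.isIn ['.', '.'] s = true
    · rw [if_pos hin, pvReplace_dots]
      have hlt := pvRep_length_lt s ((PySem.Chars.isIn_iff_infix _ _).mp hin)
      rw [ih (pvRep s) (by omega)]
      exact pvDD_rep s false
    · rw [if_neg hin]
      have := pvDD_no_dots s (by
        intro h'
        exact hin ((PySem.Chars.isIn_iff_infix _ _).mpr h'))
      exact this.1.symm

theorem pvCollapse_eq_dd (s : List Char) : pvCollapse s = pvDD false s :=
  pvCollapse_eq_dd_aux s.length s le_rfl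

theorem pvGetD_last (l : List Char) :
    PySem.List.pyGetD l (-1) ' ' = l.getLast?.getD ' ' := by
  cases l with
  | nil => rfl
  | cons c t =>
    simp [PySem.List.pyGetD, PySem.List.pyGet?, PySem.List.pyIdx?, List.getLast?_eq_getElem?]

theorem pvGetD_head (l : List Char) :
    PySem.List.pyGetD l 0 ' ' = l.head?.getD ' ' := by
  cases l with
  | nil => rfl
  | cons c t => simp [PySem.List.pyGetD, PySem.List.pyGet?, PySem.List.pyIdx?]

-- B's loop computes pvDD applied to the filtered lowered characters
theorem pvB_loop (s : List Char) : ∀ (acc : List Char),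
    s.foldl (fun buf ch =>
      if pvAllowed (PySem.Chars.lowerChar ch) then
        if PySem.Chars.lowerChar ch = '.' ∧ buf ≠ [] ∧
            PySem.List.pyGetD buf (-1) ' ' = '.' then buf
        else buf ++ [PySem.Chars.lowerChar ch]
      else buf) acc
    = acc ++ pvDD (decide (acc.getLast? = some '.'))
        ((s.map PySem.Chars.lowerChar).filter pvAllowed) := by
  induction s with
  | nil => intro acc; simp [pvDD]
  | cons ch t ih =>
    intro acc
    simp only [List.foldl_cons, List.map_cons, List.filter_cons]
    by_cases ha : pvAllowed (PySem.Chars.lowerChar ch) = true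
    · rw [if_pos ha, if_pos ha]
      by_cases hc : PySem.Chars.lowerChar ch = '.'
      · by_cases hp : acc.getLast? = some '.'
        · have hcond : PySem.Chars.lowerChar ch = '.' ∧ acc ≠ [] ∧
              PySem.List.pyGetD acc (-1) ' ' = '.' := by
            refine ⟨hc, ?_, ?_⟩
            · intro heq; subst heq; simp at hp
            · rw [pvGetD_last, hp]; rfl
          rw [if_pos hcond, ih acc, hc]
          simp [pvDD, hp]
        · have hcond : ¬ (PySem.Chars.lowerChar ch = '.' ∧ acc ≠ [] ∧
              PySem.List.pyGetD acc (-1) ' ' = '.') := by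
            rintro ⟨-, hne, hlast⟩
            rw [pvGetD_last] at hlast
            cases hl : acc.getLast? with
            | none => exact hne (by simpa using hl)
            | some x =>
              rw [hl] at hlast; simp at hlast
              exact hp (by rw [hl, hlast])
          rw [if_neg hcond, ih (acc ++ [PySem.Chars.lowerChar ch]), hc]
          simp [pvDD, hp]
      · have hcond : ¬ (PySem.Chars.lowerChar ch = '.' ∧ acc ≠ [] ∧
            PySem.List.pyGetD acc (-1) ' ' = '.') := fun hx => hc hx.1
        rw [if_neg hcond, ih (acc ++ [PySem.Chars.lowerChar ch])]
        by_cases hp : acc.getLast? = some '.' <;>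
          simp [pvDD, hc, hp]
    · rw [if_neg ha, if_neg ha, ih acc]

-- structure of the collapsed string: no '..' remains
theorem pvDD_no_dd (s : List Char) : ∀ p, ¬ ['.', '.'] <:+: pvDD p s := by
  induction s with
  | nil => intro p h; exact absurd h.length_le (by simp [pvDD])
  | cons c t ih =>
    intro p h
    by_cases hc : c = '.'
    · subst hc
      cases p with
      | true => exact ih true (by simpa [pvDD] using h)
      | false =>
        rw [show pvDD false ('.' :: t) = '.' :: pvDD true t from by simp [pvDD]] at h
        rcases List.infix_cons_iff.mp h with hpre | hinf
        · rw [List.cons_prefix_cons] at hpre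
          rcases hpre.2 with ⟨rest, hrest⟩
          exact pvDD_head t (by rw [← hrest]; simp)
        · exact ih true hinf
    · rw [show pvDD p (c :: t) = c :: pvDD false t from by simp [pvDD, hc]] at h
      rcases List.infix_cons_iff.mp h with hpre | hinf
      · rw [List.cons_prefix_cons] at hpre
        exact hc hpre.1.symm
      · exact ih false hinf

theorem pvDD_ne_nil (s : List Char) (h : s ≠ []) : pvDD false s ≠ [] := by
  cases s with
  | nil => exact absurd rfl h
  | cons c t => by_cases hc : c = '.' <;> simp [pvDD, hc]

theorem pv_endswith_dot (l : List Char) :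
    PySem.Chars.endswith l ['.'] = true ↔ l.getLast? = some '.' := by
  rw [PySem.Chars.endswith_iff]
  constructor
  · rintro ⟨u, rfl⟩; simp
  · intro h
    rcases List.getLast?_eq_some_iff.mp h with ⟨u, rfl⟩
    exact ⟨u, rfl⟩

theorem pvStrip_eq (r : List Char) : PySem.Chars.stripChars r ['.'] =
    (List.dropWhile (fun c => List.contains ['.'] c)
      (List.dropWhile (fun c => List.contains ['.'] c) r).reverse).reverse := rfl

theorem pvHeadDrop (X : List Char) {y : Char}
    (h : (List.dropWhile (fun c => List.contains ['.'] c) X).head? = some y) : y ≠ '.' := by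
  have hd := List.head?_dropWhile_not (fun c => List.contains ['.'] c) X
  intro hy; subst hy
  cases hdw : List.dropWhile (fun c => List.contains ['.'] c) X with
  | nil => rw [hdw] at h; simp at h
  | cons a b =>
    rw [hdw] at h hd
    simp at h hd
    subst h
    simp at hd

theorem pvStrip_last (r : List Char) :
    (PySem.Chars.stripChars r ['.']).getLast? ≠ some '.' := by
  rw [pvStrip_eq, List.getLast?_eq_head?_reverse, List.reverse_reverse]
  intro hh
  exact pvHeadDrop _ hh rfl

theorem pvStrip_head (r : List Char) :
    (PySem.Chars.stripChars r ['.']).head? ≠ some '.' := by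
  rw [pvStrip_eq]
  intro hh
  obtain ⟨u, hu⟩ := List.dropWhile_suffix
    (l := (List.dropWhile (fun c => List.contains ['.'] c) r).reverse)
    (fun c => List.contains ['.'] c)
  have hm : List.dropWhile (fun c => List.contains ['.'] c) r
      = (List.dropWhile (fun c => List.contains ['.'] c)
          (List.dropWhile (fun c => List.contains ['.'] c) r).reverse).reverse ++ u.reverse := by
    have := congrArg List.reverse hu
    simpa using this.symm
  have hhead : (List.dropWhile (fun c => List.contains ['.'] c) r).head? = some '.' := by
    rw [hm]
    cases hw : (List.dropWhile (fun c => List.contains ['.'] c)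
        (List.dropWhile (fun c => List.contains ['.'] c) r).reverse).reverse with
    | nil => rw [hw] at hh; simp at hh
    | cons y v =>
      rw [hw] at hh; simp at hh; subst hh; simp
  exact pvHeadDrop r hhead rfl

-- the right-strip step (A's step-4 trailing-dot removal) equals stripChars
-- when there is no leading dot and no '..'
theorem pv_strip_right (l : List Char) (hh : l.head? ≠ some '.')
    (hnd : ¬ ['.', '.'] <:+: l) :
    (if PySem.List.pyGetD l (-1) ' ' = '.' then PySem.List.slice l none (some (-1)) else l)
    = PySem.Chars.stripChars l ['.'] := by
  have hdw : List.dropWhile (fun c => List.contains ['.'] c) l = l := by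
    cases l with
    | nil => rfl
    | cons c t =>
      have : ¬ c = '.' := by simpa using hh
      simp [this]
  rw [pvStrip_eq, hdw]
  rw [pvGetD_last]
  cases hl : l.getLast? with
  | none =>
    have : l = [] := by simpa using hl
    subst this; rfl
  | some x =>
    rcases List.getLast?_eq_some_iff.mp hl with ⟨u, rfl⟩
    by_cases hx : x = '.'
    · subst hx
      rw [if_pos (by simp)]
      rw [PySem.List.slice_to_neg_one]
      have hu : (List.dropWhile (fun c => List.contains ['.'] c) (u ++ ['.']).reverse)
          = u.reverse := by
        simp only [List.reverse_append, List.reverse_cons, List.reverse_nil, List.nil_append,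
          List.singleton_append, List.dropWhile_cons]
        simp only [List.contains_cons, beq_self_eq_true, Bool.true_or, if_pos]
        cases hu' : u.reverse with
        | nil => simp
        | cons y v =>
          have hyne : ¬ y = '.' := by
            intro hy; subst hy
            have hu2 : u = v.reverse ++ ['.'] := by
              have := congrArg List.reverse hu'
              simpa using this
            exact hnd ⟨v.reverse, [], by simp [hu2]⟩
          simp [hyne]
      rw [hu]
      simp
    · rw [if_neg (by simp [hx])]
      have hzz : (List.dropWhile (fun c => List.contains ['.'] c) (u ++ [x]).reverse)
          = (u ++ [x]).reverse := by
        cases h' : (u ++ [x]).reverse with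
        | nil => simp
        | cons y v =>
          have hy : y = x := by
            have := congrArg List.head? h'
            simp at this
            exact this.symm
          subst hy
          simp [hx]
      rw [hzz]; simp

-- padding loop = closed form, for nonempty input
theorem pvPad_eq (l : List Char) (h : l ≠ []) :
    pvPad l = if l.length < 3 then
        l ++ List.replicate (3 - l.length) (PySem.List.pyGetD l (-1) ' ')
      else l := by
  match l with
  | [a] =>
    rw [pvPad]; rw [pvPad]; rw [pvPad]
    simp [pvGetD_last, List.replicate]
  | [a, b] =>
    rw [pvPad]; rw [pvPad]
    simp [pvGetD_last]
  | a :: b :: c :: t =>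
    rw [pvPad]
    simp

-- ===== MAIN PROOF =====

theorem pv_tail_eq (r : List Char)
    (hnd : ¬ ['.', '.'] <:+: r) (hne : r ≠ []) :
    (let a4 := if PySem.List.pyGetD r 0 ' ' = '.' ∧ 1 < r.length then
        PySem.List.slice r (some 1) none else r
     let a5 := if PySem.List.pyGetD a4 (-1) ' ' = '.' then
        PySem.List.slice a4 none (some (-1)) else a4
     let a6 := if a5 = [] then ['a'] else a5
     let a7 := if 16 ≤ a6.length then
        let t := PySem.List.slice a6 (some 0) (some 15)
        if PySem.List.pyGetD t (-1) ' ' = '.' then PySem.List.slice t none (some (-1)) else t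
      else a6
     pvPad a7)
    = (let s0 := PySem.Chars.stripChars r ['.']
       let s := if s0 = [] then ['a'] else s0
       let t0 := PySem.List.slice s none (some 15)
       let t := if PySem.Chars.endswith t0 ['.'] then
          PySem.List.slice t0 none (some (-1)) else t0
       if t.length < 3 then
          t ++ List.replicate (3 - t.length) (PySem.List.pyGetD t (-1) ' ')
       else t) := by
  -- step 1: the two edge-dot removals equal stripChars
  have hstrip : (let a4 := if PySem.List.pyGetD r 0 ' ' = '.' ∧ 1 < r.length then
        PySem.List.slice r (some 1) none else r
      if PySem.List.pyGetD a4 (-1) ' ' = '.' then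
        PySem.List.slice a4 none (some (-1)) else a4)
      = PySem.Chars.stripChars r ['.'] := by
    match r, hne with
    | c :: t, _ =>
      by_cases hc : c = '.'
      · subst hc
        match t with
        | [] =>
          -- r = ['.']: A keeps the leading dot (length 1), the trailing check removes it
          decide
        | d :: t' =>
          have hd : ¬ d = '.' := by
            intro hd; subst hd
            exact hnd ⟨[], t', by simp⟩
          have hnd' : ¬ ['.', '.'] <:+: (d :: t') := fun h' =>
            hnd (h'.trans (List.suffix_cons '.' (d :: t')).isInfix)
          have h4 : (if PySem.List.pyGetD ('.' :: d :: t') 0 ' ' = '.' ∧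
              1 < ('.' :: d :: t').length then
              PySem.List.slice ('.' :: d :: t') (some 1) none else ('.' :: d :: t'))
              = d :: t' := by
            rw [if_pos ⟨by rw [pvGetD_head]; rfl, by simp⟩]
            rw [PySem.List.slice_from _ (by norm_num)]
            simp
          simp only [h4]
          rw [pv_strip_right (d :: t') (by simpa using hd) hnd']
          -- stripChars drops the single leading dot first
          rw [pvStrip_eq, pvStrip_eq]
          simp [hd]
      · have h4 : (if PySem.List.pyGetD (c :: t) 0 ' ' = '.' ∧ 1 < (c :: t).length then
            PySem.List.slice (c :: t) (some 1) none else (c :: t)) = c :: t := by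
          rw [if_neg]; rintro ⟨h1, -⟩; rw [pvGetD_head] at h1; simp at h1; exact hc h1
        simp only [h4]
        exact pv_strip_right (c :: t) (by simpa using hc) hnd
  simp only [hstrip]
  -- from here both sides start from s := stripChars r ['.'] (or ['a'])
  set s0 := PySem.Chars.stripChars r ['.'] with hs0
  set s : List Char := if s0 = [] then ['a'] else s0 with hs
  have hsne : s ≠ [] := by
    rw [hs]; by_cases h0 : s0 = [] <;> simp [h0]
  have hshead : s.head? ≠ some '.' := by
    rw [hs]
    by_cases h0 : s0 = []
    · simp [h0]
    · rw [if_neg h0, hs0]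
      exact pvStrip_head r
  have hslast : s.getLast? ≠ some '.' := by
    rw [hs]
    by_cases h0 : s0 = []
    · simp [h0]
    · rw [if_neg h0, hs0]
      exact pvStrip_last r
  -- step 2: truncation
  have htrunc : (if 16 ≤ s.length then
        let t := PySem.List.slice s (some 0) (some 15)
        if PySem.List.pyGetD t (-1) ' ' = '.' then PySem.List.slice t none (some (-1)) else t
      else s)
      = (let t0 := PySem.List.slice s none (some 15)
         if PySem.Chars.endswith t0 ['.'] then PySem.List.slice t0 none (some (-1)) else t0) := by
    have hsl : PySem.List.slice s (some 0) (some 15) = PySem.List.slice s none (some 15) := by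
      rw [PySem.List.slice_to _ (by norm_num)]
      have h1 := PySem.List.slice_natCast s 0 15
      simp at h1 ⊢
      simpa using h1
    by_cases h16 : 16 ≤ s.length
    · rw [if_pos h16]
      simp only [hsl]
      refine if_congr ?_ rfl rfl
      rw [pvGetD_last, pv_endswith_dot]
      cases hl : (PySem.List.slice s none (some 15)).getLast? with
      | none => simp
      | some x => simp
    · rw [if_neg h16]
      have hts : PySem.List.slice s none (some 15) = s := by
        rw [PySem.List.slice_to _ (by norm_num)]
        apply List.take_of_length_le
        simp
        omega
      simp only [hts]
      rw [if_neg]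
      intro hend
      exact hslast ((pv_endswith_dot s).mp hend)
  simp only [htrunc]
  -- step 3: padding
  set t0 := PySem.List.slice s none (some 15) with ht0
  set t : List Char := if PySem.Chars.endswith t0 ['.'] then
      PySem.List.slice t0 none (some (-1)) else t0 with ht
  have ht0s : t0 = s.take 15 := by
    rw [ht0, PySem.List.slice_to _ (by norm_num)]
    simp
  have ht0head : t0.head? ≠ some '.' := by
    have hgen : ∀ (l : List Char), (l.take 15).head? = l.head? := by
      intro l; cases l <;> rfl
    rw [ht0s, hgen]
    exact hshead
  have htne : t ≠ [] := by
    rw [ht]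
    by_cases he : PySem.Chars.endswith t0 ['.'] = true
    · rw [if_pos he]
      rw [PySem.List.slice_to_neg_one]
      have hl := (pv_endswith_dot t0).mp he
      intro hnil
      match t0, hl, hnil, ht0head with
      | [x], hl, _, hth =>
        have : x = '.' := by simpa using hl
        exact hth (by simp [this])
      | [], hl, _, _ => simp at hl
      | x :: y :: rest, _, hnil, _ => simp at hnil
    · rw [if_neg he]
      rw [ht0s]
      intro h'
      rw [List.take_eq_nil_iff] at h'
      rcases h' with h' | h'
      · exact absurd h' (by norm_num)
      · exact hsne h'
  exact pvPad_eq t htne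

theorem pv_filter_ne_nil (new_id : String) (h : Pre_solution new_id) :
    (new_id.toList.map PySem.Chars.lowerChar).filter pvAllowed ≠ [] := by
  unfold Pre_solution at h
  simp only [List.any_eq_true] at h
  rcases h with ⟨c, hc, hall⟩
  intro hnil
  have : PySem.Chars.lowerChar c ∈
      (new_id.toList.map PySem.Chars.lowerChar).filter pvAllowed := by
    rw [List.mem_filter]
    exact ⟨List.mem_map_of_mem hc, hall⟩
  rw [hnil] at this
  simp at this

-- ===== VERDICT (by name: the statement is the Claim_ definition above) =====
theorem solution_spec : Claim_equal_solution := by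
  intro new_id _ hpre
  unfold Spec_solution
  simp only [solution, solution_alt, PySem.Chars.lower]
  rw [pvB_loop]
  have hA := PySem.List.foldl_append_if pvAllowed id (new_id.toList.map PySem.Chars.lowerChar) []
  simp only [id_eq, List.map_id, List.nil_append] at hA
  rw [hA]
  rw [pvCollapse_eq_dd]
  have hF := pv_filter_ne_nil new_id hpre
  exact congrArg String.mk
    (pv_tail_eq _ (pvDD_no_dd _ false) (pvDD_ne_nil _ hF))
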